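-- pv_equiv track=rewrite | github.com/morikouhei/programming_contest | atcoder/abc/abc274/d.py | calc
-- ===== SOURCE A (Python) =====
-- M = 10**4+5
--
-- def calc(s,t,lis):
--     dp = [0]*(2*M)
--     dp[s] = 1
--     for a in lis:
--         ndp = [0]*(2*M)
--         for i in range(-M,M):
--             if dp[i] == 0:
--                 continue
--             if i+a < M:
--                 ndp[i+a] = 1
--             if i-a > -M:
--                 ndp[i-a] = 1
--         dp = ndp
--     return dp[t]
-- ===== SOURCE B (Python) =====
-- M = 10**4+5
--
-- def calc(s, t, lis):
--     # reachable positions as one big-integer bitset: bit j <-> position j - M;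
--     # each step is two shifts + masks instead of a per-cell scan
--     full = (1 << (2*M)) - 1
--     cur = 1 << (s + M)
--     for a in lis:
--         a = min(abs(a), 2*M)  # a step moves +-a, so only |a| matters; a shift by >= 2*M clears every bit anyway
--         cur = ((cur << a) & full) | ((cur >> a) & (full - 1))
--     return (cur >> (t + M)) & 1
-- ===== Notes on version B (the rewrite author's own statement) =====
-- stated objective: faster
-- what changed: Replaces the dense list-of-ints DP with a per-cell Python loop over all 2*M indices each step by a big-integer bitset: one step is two whole-word shifts plus boundary masks, so the inner loop over cells disappears.
-- outside the precondition, e.g. on calc(10006, -10004, []): A returns 1, B returns 0; on calc(-10000, 10000, [-10]): A returns 1, B returns 0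
import Mathlib
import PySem

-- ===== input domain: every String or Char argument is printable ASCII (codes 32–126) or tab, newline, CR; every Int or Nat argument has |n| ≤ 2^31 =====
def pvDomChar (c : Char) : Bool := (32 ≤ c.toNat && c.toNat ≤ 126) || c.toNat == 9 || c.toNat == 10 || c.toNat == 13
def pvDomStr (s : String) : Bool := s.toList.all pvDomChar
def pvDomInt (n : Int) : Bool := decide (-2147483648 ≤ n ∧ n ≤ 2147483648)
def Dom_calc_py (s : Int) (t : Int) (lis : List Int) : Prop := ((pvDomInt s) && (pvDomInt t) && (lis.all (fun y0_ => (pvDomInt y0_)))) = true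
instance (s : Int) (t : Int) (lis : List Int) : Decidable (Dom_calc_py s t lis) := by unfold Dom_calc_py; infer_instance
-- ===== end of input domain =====

-- B replaces A's dense 2*M-cell list DP (a per-cell Python loop every step) by one big-integer
-- bitset updated with two shifts and boundary masks per step (measured faster by the timing
-- run); equal on the board range [-M, M) with nonnegative steps.


-- ===== PORT A =====
-- A-side helpers: Python list indexing, ported by hand on Array so each access is O(1) like
-- Python's list (exact: a negative index counts from the end; out of range = IndexError in
-- Python, modelled by the default / no-op arm, never reached on inputs admitted by Pre_).
def pvAIdx? (n : Nat) (i : Int) : Option Nat :=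
  if 0 ≤ i ∧ i < (n : Int) then some i.toNat
  else if -(n : Int) ≤ i ∧ i < 0 then some (i + n).toNat
  else none
def pvAGetD (xs : Array Int) (i : Int) : Int :=
  match pvAIdx? xs.size i with
  | some j => xs.getD j 0
  | none => 0
def pvASetD (xs : Array Int) (i : Int) (v : Int) : Array Int :=
  match pvAIdx? xs.size i with
  | some j => xs.setIfInBounds j v
  | none => xs

-- literal transliteration of calc: dense DP array dp of length 2*M (M = 10**4+5 = 10005, 2*M = 20010),
-- Python indices −M…M−1 (negative ones read/write from the end, as pvAGetD/pvASetD do).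
def calc_py (s : Int) (t : Int) (lis : List Int) : Int :=
  let dp : Array Int := Array.replicate 20010 0                   -- dp = [0]*(2*M)
  let dp := pvASetD dp s 1                                        -- dp[s] = 1
  let dp := lis.foldl (fun dp a =>
    let ndp : Array Int := Array.replicate 20010 0                -- ndp = [0]*(2*M)
    let ndp := (PySem.List.pyRange (-10005) 10005 1).foldl (fun ndp i =>
      if pvAGetD dp i == 0 then ndp                               -- if dp[i] == 0: continue
      else
        let ndp := if i + a < 10005 then pvASetD ndp (i + a) 1 else ndp
        if i - a > -10005 then pvASetD ndp (i - a) 1 else ndp) ndp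
    ndp) dp
  pvAGetD dp t                                                    -- return dp[t]

-- ===== PORT B =====
-- transliteration of Source B: cur is a big-integer bitset, bit j ↔ board position j - M.
-- Python's min(abs(a), 2*M) is a Nat (min a.natAbs 20010); Python raises ValueError on
-- 1 << (s+M) with s < -M — excluded by Pre_ below, so .toNat never actually clamps there.
def calc_py_alt (s : Int) (t : Int) (lis : List Int) : Int :=
  let full : Nat := (1 <<< 20010) - 1                             -- full = (1 << (2*M)) - 1
  let cur : Nat := 1 <<< (s + 10005).toNat                        -- cur = 1 << (s + M)
  let cur := lis.foldl (fun cur a =>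
    let k : Nat := min a.natAbs 20010                            -- a = min(abs(a), 2*M)
    ((cur <<< k) &&& full) ||| ((cur >>> k) &&& (full - 1))) cur
  Int.ofNat ((cur >>> (t + 10005).toNat) &&& 1)                   -- return (cur >> (t + M)) & 1

-- ===== PRECONDITION & SPEC =====
-- Pre_ restricts s and t to the board range [-M, M) and every step to be nonnegative: outside it,
-- A either raises IndexError (|s| or |t| ≥ 2*M, or a step negative enough to push an index below -2*M)
-- or silently reads/writes positions through Python's negative-index wraparound of the flat array,
-- an accident of the dense encoding that no caller of this contest DP relies on (B, whose step
-- depends only on |a|, keeps every position on the board instead).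
def Pre_calc_py (s : Int) (t : Int) (lis : List Int) : Prop :=
  -10005 ≤ s ∧ s < 10005 ∧ -10005 ≤ t ∧ t < 10005 ∧ ∀ a ∈ lis, 0 ≤ a
instance (s : Int) (t : Int) (lis : List Int) : Decidable (Pre_calc_py s t lis) := by
  unfold Pre_calc_py; infer_instance

def pvWitness_calc_py : Int × Int × List Int := (0, 2, [1, 3])

def Spec_calc_py (s : Int) (t : Int) (lis : List Int) (out : Int) : Prop := out = calc_py_alt s t lis
instance (s : Int) (t : Int) (lis : List Int) (out : Int) : Decidable (Spec_calc_py s t lis out) := by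
  unfold Spec_calc_py; infer_instance

-- ===== CLAIM (what is proved, stated in full; the proofs are below) =====
def Claim_equal_calc_py : Prop := ∀ (s : Int) (t : Int) (lis : List Int), Dom_calc_py s t lis → Pre_calc_py s t lis → Spec_calc_py s t lis (calc_py s t lis)

-- ===== LEMMAS AND PROOFS =====

-- canonical flat-array index of a board position k ∈ [-10005, 10005)
def pvIdx (k : Int) : Nat := if 0 ≤ k then k.toNat else 20010 - (-k).toNat

theorem pvIdx_inj (j k : Int) (hj1 : -10005 ≤ j) (hj2 : j < 10005)
    (hk1 : -10005 ≤ k) (hk2 : k < 10005) (h : pvIdx j = pvIdx k) : j = k := by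
  unfold pvIdx at h; split_ifs at h <;> omega

theorem pvIdx_lt (k : Int) (hk1 : -10005 ≤ k) (hk2 : k < 10005) : pvIdx k < 20010 := by
  unfold pvIdx; split_ifs <;> omega

theorem pvAIdx_eq (k : Int) (hk1 : -10005 ≤ k) (hk2 : k < 10005) :
    pvAIdx? 20010 k = some (pvIdx k) := by
  unfold pvAIdx? pvIdx
  split_ifs <;> first | rfl | omega | (simp only [Option.some.injEq]; omega)

theorem pvA_size (xs : Array Int) (i v : Int) : (pvASetD xs i v).size = xs.size := by
  unfold pvASetD
  rcases pvAIdx? xs.size i with _ | j <;> simp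

theorem pvA_rd_wr (xs : Array Int) (h : xs.size = 20010) (j k v : Int)
    (hj1 : -10005 ≤ j) (hj2 : j < 10005) (hk1 : -10005 ≤ k) (hk2 : k < 10005) :
    pvAGetD (pvASetD xs j v) k = if k = j then v else pvAGetD xs k := by
  have hset : pvASetD xs j v = xs.setIfInBounds (pvIdx j) v := by
    unfold pvASetD
    rw [h, pvAIdx_eq j hj1 hj2]
  rw [hset]
  unfold pvAGetD
  rw [Array.size_setIfInBounds, h, pvAIdx_eq k hk1 hk2]
  simp only [Array.getD_eq_getD_getElem?, Array.getElem?_setIfInBounds]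
  by_cases hkj : k = j
  · subst hkj
    rw [if_pos rfl, if_pos (h ▸ pvIdx_lt k hk1 hk2), if_pos rfl]
    rfl
  · have hne : pvIdx j ≠ pvIdx k := fun e => hkj ((pvIdx_inj j k hj1 hj2 hk1 hk2 e).symm)
    rw [if_neg hne, if_neg hkj]

theorem pvA_rd_replicate (k : Int) : pvAGetD (Array.replicate 20010 (0 : Int)) k = 0 := by
  unfold pvAGetD
  rcases pvAIdx? (Array.replicate 20010 (0 : Int)).size k with _ | j
  · rfl
  · simp only [Array.getD_eq_getD_getElem?, Array.getElem?_replicate]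
    split_ifs <;> rfl

-- the move relation of one step of A
def pvHit (a i k : Int) : Bool :=
  (decide (i + a < 10005) && decide (k = i + a)) || (decide (-10005 < i - a) && decide (k = i - a))

theorem pvHit_iff (a i k : Int) :
    pvHit a i k = true ↔ ((i + a < 10005 ∧ k = i + a) ∨ (-10005 < i - a ∧ k = i - a)) := by
  simp [pvHit]

-- characterisation of A's inner loop over range(-M, M)
theorem pv_stepA (dp : Array Int) (a : Int) (ha : 0 ≤ a) (L : List Int)
    (hL : ∀ i ∈ L, -10005 ≤ i ∧ i < 10005) (nd : Array Int) (hnd : nd.size = 20010) :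
    (L.foldl (fun ndp i =>
      if pvAGetD dp i == 0 then ndp
      else
        let ndp := if i + a < 10005 then pvASetD ndp (i + a) 1 else ndp
        if i - a > -10005 then pvASetD ndp (i - a) 1 else ndp) nd).size = 20010
    ∧ ∀ k : Int, -10005 ≤ k → k < 10005 →
      pvAGetD (L.foldl (fun ndp i =>
        if pvAGetD dp i == 0 then ndp
        else
          let ndp := if i + a < 10005 then pvASetD ndp (i + a) 1 else ndp
          if i - a > -10005 then pvASetD ndp (i - a) 1 else ndp) nd) k
      = if ∃ i ∈ L, pvAGetD dp i ≠ 0 ∧ pvHit a i k then 1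
        else pvAGetD nd k := by
  induction L generalizing nd with
  | nil => exact ⟨hnd, fun k hk1 hk2 => by simp⟩
  | cons i L ih =>
    obtain ⟨hi1, hi2⟩ := hL i (List.mem_cons_self)
    have hL' : ∀ x ∈ L, -10005 ≤ x ∧ x < 10005 := fun x hx => hL x (List.mem_cons_of_mem i hx)
    simp only [List.foldl_cons]
    by_cases hz : pvAGetD dp i = 0
    · rw [if_pos (by simpa using hz)]
      obtain ⟨hlen', hch⟩ := ih hL' nd hnd
      refine ⟨hlen', fun k hk1 hk2 => ?_⟩
      rw [hch k hk1 hk2]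
      by_cases hEL : ∃ x ∈ L, pvAGetD dp x ≠ 0 ∧ pvHit a x k
      · rw [if_pos hEL, if_pos (by
          obtain ⟨x, hx, hc⟩ := hEL
          exact ⟨x, List.mem_cons_of_mem i hx, hc⟩)]
      · rw [if_neg hEL, if_neg (by
          rintro ⟨x, hx, hc⟩
          rcases List.mem_cons.mp hx with rfl | hx'
          · exact hc.1 hz
          · exact hEL ⟨x, hx', hc⟩)]
    · rw [if_neg (by simpa using hz)]
      set nd1 := if i + a < 10005 then pvASetD nd (i + a) 1 else nd with hnd1
      set nd2 := if i - a > -10005 then pvASetD nd1 (i - a) 1 else nd1 with hnd2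
      have hlen1 : nd1.size = 20010 := by
        rw [hnd1]; split_ifs <;> simp [pvA_size, hnd]
      have hlen2 : nd2.size = 20010 := by
        rw [hnd2]; split_ifs <;> simp [pvA_size, hlen1]
      have hrd : ∀ k : Int, -10005 ≤ k → k < 10005 →
          pvAGetD nd2 k = if pvHit a i k then 1 else pvAGetD nd k := by
        intro k hk1 hk2
        rw [hnd2, hnd1]
        simp only [pvHit_iff]
        by_cases g1 : i + a < 10005 <;> by_cases g2 : i - a > -10005
        · rw [if_pos g2, if_pos g1,
            pvA_rd_wr _ (by simp [pvA_size, hnd]) _ _ _ (by omega) (by omega) hk1 hk2,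
            pvA_rd_wr nd hnd _ _ _ (by omega) g1 hk1 hk2]
          split_ifs <;> first | rfl | omega
        · rw [if_neg g2, if_pos g1, pvA_rd_wr nd hnd _ _ _ (by omega) g1 hk1 hk2]
          split_ifs <;> first | rfl | omega
        · rw [if_pos g2, if_neg g1,
            pvA_rd_wr nd hnd _ _ _ (by omega) (by omega) hk1 hk2]
          split_ifs <;> first | rfl | omega
        · rw [if_neg g2, if_neg g1]
          split_ifs <;> first | rfl | omega
      obtain ⟨hlenF, hch⟩ := ih hL' nd2 hlen2
      refine ⟨hlenF, fun k hk1 hk2 => ?_⟩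
      rw [hch k hk1 hk2, hrd k hk1 hk2]
      by_cases hEL : ∃ x ∈ L, pvAGetD dp x ≠ 0 ∧ pvHit a x k
      · rw [if_pos hEL, if_pos (by
          obtain ⟨x, hx, hc⟩ := hEL
          exact ⟨x, List.mem_cons_of_mem i hx, hc⟩)]
      · rw [if_neg hEL]
        by_cases hH : pvHit a i k
        · rw [if_pos hH, if_pos ⟨i, List.mem_cons_self, hz, hH⟩]
        · rw [if_neg hH, if_neg (by
            rintro ⟨x, hx, hc⟩
            rcases List.mem_cons.mp hx with rfl | hx'
            · exact hH hc.2
            · exact hEL ⟨x, hx', hc⟩)]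

-- bit characterisation of one B step
theorem pv_testBit_full1 (j : Nat) :
    ((1 <<< 20010 : Nat) - 1 - 1).testBit j = (decide (1 ≤ j) && decide (j < 20010)) := by
  have h : (1 <<< 20010 : Nat) - 1 - 1 = (2 ^ 20009 - 1) <<< 1 := by
    have e1 : (2:Nat) ^ 20010 = 2 ^ 20009 * 2 := pow_succ 2 20009
    have e2 : (1:Nat) ≤ 2 ^ 20009 := Nat.one_le_two_pow
    rw [Nat.one_shiftLeft, Nat.shiftLeft_eq, pow_one]
    omega
  rw [h, Nat.testBit_shiftLeft, Nat.testBit_two_pow_sub_one, Bool.eq_iff_iff]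
  simp only [Bool.and_eq_true, decide_eq_true_eq, ge_iff_le]
  omega

theorem pv_stepB_bit (cur k j : Nat) :
    (((cur <<< k) &&& ((1 <<< 20010 : Nat) - 1)) ||| ((cur >>> k) &&& ((1 <<< 20010 : Nat) - 1 - 1))).testBit j = true
    ↔ ((k ≤ j ∧ j < 20010 ∧ cur.testBit (j - k) = true)
        ∨ (1 ≤ j ∧ j < 20010 ∧ cur.testBit (j + k) = true)) := by
  rw [Nat.testBit_lor, Nat.testBit_land, Nat.testBit_land, Nat.testBit_shiftLeft,
    Nat.testBit_shiftRight, pv_testBit_full1, Nat.one_shiftLeft, Nat.testBit_two_pow_sub_one]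
  rw [Nat.add_comm k j]
  simp only [Bool.or_eq_true, Bool.and_eq_true, decide_eq_true_eq, ge_iff_le]
  tauto

set_option maxRecDepth 10000 in
theorem pv_stepB_lt (cur k : Nat) :
    ((cur <<< k) &&& ((1 <<< 20010 : Nat) - 1)) ||| ((cur >>> k) &&& ((1 <<< 20010 : Nat) - 1 - 1)) < 2 ^ 20010 := by
  simp only [Nat.one_shiftLeft]
  apply Nat.or_lt_two_pow
  · rw [Nat.and_two_pow_sub_one_eq_mod]
    exact Nat.mod_lt _ (Nat.two_pow_pos _)
  · exact lt_of_le_of_lt Nat.and_le_right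
      (lt_of_le_of_lt (Nat.sub_le _ 1) (Nat.sub_lt (Nat.two_pow_pos _) one_pos))

-- bits above 20010 of a bounded bitset are clear
theorem pv_bit_hi (cur : Nat) (h : cur < 2 ^ 20010) (j : Nat) (hj : 20010 ≤ j) :
    cur.testBit j = false :=
  Nat.testBit_lt_two_pow (lt_of_lt_of_le h (Nat.pow_le_pow_right (by norm_num) hj))

-- the main invariant, by induction over the step list
set_option maxRecDepth 10000 in
theorem pv_main (lis : List Int) (hpos : ∀ a ∈ lis, 0 ≤ a) (dp : Array Int) (cur : Nat)
    (hlen : dp.size = 20010) (hcur : cur < 2 ^ 20010)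
    (hinv : ∀ v : Int, -10005 ≤ v → v < 10005 →
      pvAGetD dp v = if cur.testBit (v + 10005).toNat then 1 else 0) :
    (lis.foldl (fun cur a =>
        let k : Nat := min a.natAbs 20010
        ((cur <<< k) &&& ((1 <<< 20010 : Nat) - 1)) ||| ((cur >>> k) &&& ((1 <<< 20010 : Nat) - 1 - 1))) cur) < 2 ^ 20010
    ∧ ∀ v : Int, -10005 ≤ v → v < 10005 →
      pvAGetD (lis.foldl (fun dp a =>
        let ndp : Array Int := Array.replicate 20010 0
        let ndp := (PySem.List.pyRange (-10005) 10005 1).foldl (fun ndp i =>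
          if pvAGetD dp i == 0 then ndp
          else
            let ndp := if i + a < 10005 then pvASetD ndp (i + a) 1 else ndp
            if i - a > -10005 then pvASetD ndp (i - a) 1 else ndp) ndp
        ndp) dp) v
      = if (lis.foldl (fun cur a =>
          let k : Nat := min a.natAbs 20010
          ((cur <<< k) &&& ((1 <<< 20010 : Nat) - 1)) ||| ((cur >>> k) &&& ((1 <<< 20010 : Nat) - 1 - 1))) cur).testBit (v + 10005).toNat
        then 1 else 0 := by
  induction lis generalizing dp cur with
  | nil => exact ⟨hcur, hinv⟩
  | cons a lis ih =>
    have ha : 0 ≤ a := hpos a List.mem_cons_self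
    have hpos' : ∀ b ∈ lis, 0 ≤ b := fun b hb => hpos b (List.mem_cons_of_mem a hb)
    simp only [List.foldl_cons]
    obtain ⟨hlen1, hch⟩ := pv_stepA dp a ha (PySem.List.pyRange (-10005) 10005 1)
      (fun i hi => by simpa using (PySem.List.mem_pyRange_one.mp hi))
      (Array.replicate 20010 0) Array.size_replicate
    apply ih hpos'
    · exact hlen1
    · exact pv_stepB_lt cur _
    · intro v hv1 hv2
      rw [hch v hv1 hv2, pvA_rd_replicate]
      refine if_congr ?_ rfl rfl
      rw [pv_stepB_bit]
      constructor
      · rintro ⟨i, hi, hne, hh⟩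
        obtain ⟨hi1, hi2⟩ := PySem.List.mem_pyRange_one.mp hi
        have hbit : cur.testBit (i + 10005).toNat = true := by
          have := hinv i hi1 hi2
          by_cases hb : cur.testBit (i + 10005).toNat
          · exact hb
          · rw [if_neg (by simpa using hb)] at this; exact absurd this hne
        rw [pvHit_iff] at hh
        rcases hh with ⟨hlt, rfl⟩ | ⟨hgt, rfl⟩
        · left
          have hk : min a.natAbs 20010 ≤ (i + a + 10005).toNat := by omega
          refine ⟨hk, by omega, ?_⟩
          have : (i + a + 10005).toNat - min a.natAbs 20010 = (i + 10005).toNat := by omega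
          rw [this]; exact hbit
        · right
          refine ⟨by omega, by omega, ?_⟩
          have : (i - a + 10005).toNat + min a.natAbs 20010 = (i + 10005).toNat := by omega
          rw [this]; exact hbit
      · rintro (⟨hk, hjlt, hb⟩ | ⟨hj1, hjlt, hb⟩)
        · -- plus branch: i = v - a
          have ha2 : a < 20010 := by
            by_contra hge
            push Not at hge
            have : min a.natAbs 20010 = 20010 := by omega
            omega
          have hkk : min a.natAbs 20010 = a.toNat := by omega
          refine ⟨v - a, PySem.List.mem_pyRange_one.mpr ⟨by omega, by omega⟩, ?_, ?_⟩
          · have heq : ((v - a) + 10005).toNat = (v + 10005).toNat - min a.natAbs 20010 := by omega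
            rw [hinv (v - a) (by omega) (by omega), heq, if_pos hb]
            norm_num
          · rw [pvHit_iff]; left; constructor <;> omega
        · -- minus branch: i = v + a
          have hlo : (v + 10005).toNat + min a.natAbs 20010 < 20010 := by
            by_contra hge
            push Not at hge
            rw [pv_bit_hi cur hcur _ hge] at hb
            exact Bool.false_ne_true hb
          have ha2 : a < 20010 := by omega
          refine ⟨v + a, PySem.List.mem_pyRange_one.mpr ⟨by omega, by omega⟩, ?_, ?_⟩
          · have heq : ((v + a) + 10005).toNat = (v + 10005).toNat + min a.natAbs 20010 := by omega
            rw [hinv (v + a) (by omega) (by omega), heq, if_pos hb]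
            norm_num
          · rw [pvHit_iff]; right; constructor <;> omega

-- extracting one bit as an Int, as B's final line does
theorem pv_bit_out (x n : Nat) :
    (Int.ofNat ((x >>> n) &&& 1)) = if x.testBit n then 1 else 0 := by
  have h1 : (x >>> n) &&& 1 = (x.testBit n).toNat := by
    rw [Nat.and_one_is_mod, Nat.shiftRight_eq_div_pow, Nat.toNat_testBit]
  rw [h1]
  cases x.testBit n <;> rfl

-- ===== VERDICT (by name: the statement is the Claim_ definition above) =====
set_option maxRecDepth 10000 in
theorem calc_py_spec : Claim_equal_calc_py := by
  intro s t lis hdom hpre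
  obtain ⟨hs1, hs2, ht1, ht2, hpos⟩ := hpre
  unfold Spec_calc_py
  simp only [calc_py, calc_py_alt]
  have hcur0 : (1 <<< (s + 10005).toNat : Nat) = 2 ^ (s + 10005).toNat := Nat.one_shiftLeft _
  have hlt0 : (1 <<< (s + 10005).toNat : Nat) < 2 ^ 20010 := by
    rw [hcur0]
    exact Nat.pow_lt_pow_right (by norm_num) (by omega)
  have h0 : ∀ v : Int, -10005 ≤ v → v < 10005 →
      pvAGetD (pvASetD (Array.replicate 20010 (0 : Int)) s 1) v
        = if (1 <<< (s + 10005).toNat : Nat).testBit (v + 10005).toNat then 1 else 0 := by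
    intro v hv1 hv2
    rw [pvA_rd_wr (Array.replicate 20010 0) Array.size_replicate s v 1 hs1 hs2 hv1 hv2,
      pvA_rd_replicate, hcur0, Nat.testBit_two_pow]
    refine if_congr ?_ rfl rfl
    simp only [decide_eq_true_eq]
    omega
  obtain ⟨hltF, hinvF⟩ := pv_main lis hpos _ _
    (by rw [pvA_size]; exact Array.size_replicate) hlt0 h0
  rw [hinvF t ht1 ht2, pv_bit_out]
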